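-- pv_equiv track=rewrite | github.com/ThomasCreagh/AI-Agents-for-Code-Review-and-Security-using-Open-Source-Models | backend/app/ai/workflow/tools/bandit_tools.py | format_bandit_results_summary
-- ===== SOURCE A (Python) =====
-- from typing import Dict, Any, List
--
-- def format_bandit_results_summary(bandit_results: Dict[str, Any]) -> str:
--     """
--     Creates a concise summary of Bandit results for inclusion in responses.
--
--     Args:
--         bandit_results: The raw Bandit results dictionary
--
--     Returns:
--         A formatted string summary
--     """
--     if not bandit_results:
--         return "No Bandit analysis results available."
--
--     results = bandit_results.get("results", [])
--
--     if not results: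
--         return "Bandit scan completed with no security issues identified."
--
--     # Count issues by severity
--     total = len(results)
--     high = sum(1 for r in results if r.get("issue_severity", "").lower() == "high")
--     medium = sum(1 for r in results if r.get("issue_severity", "").lower() == "medium")
--     low = sum(1 for r in results if r.get("issue_severity", "").lower() == "low")
--
--     summary = f"Bandit scan identified {total} potential security issues: "
--     summary += f"{high} high, {medium} medium, and {low} low severity."
--
--     # Add one or two examples of high severity issues if they exist
--     if high > 0:
--         high_issues = [r for r in results if r.get("issue_severity", "").lower() == "high"]
--         summary += " Examples include: "
--
--         for i, issue in enumerate(high_issues[:2]):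
--             if i > 0:
--                 summary += "; "
--             test_id = issue.get("test_id", "")
--             issue_text = issue.get("issue_text", "")
--             summary += f"{test_id}: {issue_text}"
--
--     return summary
-- ===== SOURCE B (Python) =====
-- def format_bandit_results_summary(bandit_results):
--     """Single-pass re-implementation: one loop builds a severity-count table
--     and the ordered list of high-severity issues."""
--     if not bandit_results:
--         return "No Bandit analysis results available."
--
--     results = bandit_results.get("results", [])
--     if not results:
--         return "Bandit scan completed with no security issues identified."
--
--     counts = {}
--     high_issues = []
--     for r in results:
--         sev = r.get("issue_severity", "").lower()
--         counts[sev] = counts.get(sev, 0) + 1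
--         if sev == "high":
--             high_issues.append(r)
--
--     summary = (
--         f"Bandit scan identified {len(results)} potential security issues: "
--         f"{counts.get('high', 0)} high, {counts.get('medium', 0)} medium, "
--         f"and {counts.get('low', 0)} low severity."
--     )
--     if high_issues:
--         examples = "; ".join(
--             f"{r.get('test_id', '')}: {r.get('issue_text', '')}"
--             for r in high_issues[:2]
--         )
--         summary += " Examples include: " + examples
--     return summary
-- ===== Notes on version B (the rewrite author's own statement) =====
-- stated objective: simpler
-- what changed: Replaced A's four independent scans of results (three severity-counting generator sums plus a high-severity filter) with one loop that builds a severity-count table and the ordered high-issues list, then formats from the table.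
import Mathlib
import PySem

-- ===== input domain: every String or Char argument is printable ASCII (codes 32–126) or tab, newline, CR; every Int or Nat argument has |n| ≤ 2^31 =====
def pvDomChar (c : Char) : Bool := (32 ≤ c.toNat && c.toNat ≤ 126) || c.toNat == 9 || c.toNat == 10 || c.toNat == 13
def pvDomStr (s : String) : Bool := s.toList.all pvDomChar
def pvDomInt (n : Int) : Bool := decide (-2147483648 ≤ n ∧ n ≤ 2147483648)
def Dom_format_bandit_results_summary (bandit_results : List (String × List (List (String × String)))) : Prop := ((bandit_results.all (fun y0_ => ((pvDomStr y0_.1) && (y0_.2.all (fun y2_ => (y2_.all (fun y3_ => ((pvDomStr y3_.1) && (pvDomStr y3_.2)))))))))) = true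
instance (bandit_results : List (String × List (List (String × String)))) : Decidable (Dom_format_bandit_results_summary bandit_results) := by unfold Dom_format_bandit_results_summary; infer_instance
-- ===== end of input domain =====

-- B replaces A's four separate scans of `results` by one loop that builds a
-- severity-count table and the ordered high-severity list (objective: simpler).

-- shared helper: dict.get(k, dflt) as first-match lookup on the association list
def lookupD {ν : Type} (d : List (String × ν)) (k : String) (dflt : ν) : ν :=
  match d.find? (fun p => p.1 == k) with
  | some p => p.2
  | none => dflt

-- r.get("issue_severity", "").lower()
def sevOf (r : List (String × String)) : String :=
  PySem.Str.lower (lookupD r "issue_severity" "")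

-- one iteration of B's loop: bump the count for sev and collect high issues
def stepB (st : PySem.Dict String Int × List (List (String × String))) (r : List (String × String)) :
    PySem.Dict String Int × List (List (String × String)) :=
  let sev := sevOf r
  let counts := st.1.insert sev (st.1.getD sev 0 + 1)
  if sev == "high" then (counts, st.2 ++ [r]) else (counts, st.2)

-- "{test_id}: {issue_text}" for an issue r
def exampleOf (r : List (String × String)) : String :=
  lookupD r "test_id" "" ++ ": " ++ lookupD r "issue_text" ""

-- ===== PORT A =====
def format_bandit_results_summary (bandit_results : List (String × List (List (String × String)))) : String :=
  if bandit_results = [] then "No Bandit analysis results available."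
  else
    let results := lookupD bandit_results "results" []
    if results = [] then "Bandit scan completed with no security issues identified."
    else
      let total : Int := results.length
      let high : Int := results.foldl (fun acc r => if sevOf r == "high" then acc + 1 else acc) 0
      let medium : Int := results.foldl (fun acc r => if sevOf r == "medium" then acc + 1 else acc) 0
      let low : Int := results.foldl (fun acc r => if sevOf r == "low" then acc + 1 else acc) 0
      let summary := "Bandit scan identified " ++ PySem.Int.toStr total ++ " potential security issues: "
      let summary := summary ++ PySem.Int.toStr high ++ " high, " ++ PySem.Int.toStr medium ++ " medium, and " ++ PySem.Int.toStr low ++ " low severity."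
      if high > 0 then
        let high_issues := results.filter (fun r => sevOf r == "high")
        let summary := summary ++ " Examples include: "
        (PySem.List.enumerate (PySem.List.slice high_issues none (some 2))).foldl
          (fun s p =>
            let s := if p.1 > 0 then s ++ "; " else s
            s ++ exampleOf p.2) summary
      else summary

-- ===== PORT B =====
def format_bandit_results_summary_alt (bandit_results : List (String × List (List (String × String)))) : String :=
  if bandit_results = [] then "No Bandit analysis results available."
  else
    let results := lookupD bandit_results "results" []
    if results = [] then "Bandit scan completed with no security issues identified."
    else
      let st := results.foldl stepB (PySem.Dict.empty, [])
      let counts := st.1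
      let high_issues := st.2
      let summary := "Bandit scan identified " ++ PySem.Int.toStr results.length ++ " potential security issues: "
        ++ PySem.Int.toStr (counts.getD "high" 0) ++ " high, " ++ PySem.Int.toStr (counts.getD "medium" 0)
        ++ " medium, and " ++ PySem.Int.toStr (counts.getD "low" 0) ++ " low severity."
      if high_issues = [] then summary
      else summary ++ " Examples include: " ++ PySem.Str.join "; " ((PySem.List.slice high_issues none (some 2)).map exampleOf)

-- ===== PRECONDITION & SPEC =====
def Spec_format_bandit_results_summary (bandit_results : List (String × List (List (String × String)))) (out : String) : Prop := out = format_bandit_results_summary_alt bandit_results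
instance (bandit_results : List (String × List (List (String × String)))) (out : String) : Decidable (Spec_format_bandit_results_summary bandit_results out) := by unfold Spec_format_bandit_results_summary; infer_instance

-- ===== CLAIM (what is proved, stated in full; the proofs are below) =====
def Claim_equal_format_bandit_results_summary : Prop := ∀ (bandit_results : List (String × List (List (String × String)))), Dom_format_bandit_results_summary bandit_results → Spec_format_bandit_results_summary bandit_results (format_bandit_results_summary bandit_results)

-- ===== LEMMAS AND PROOFS =====

-- A's counting fold is the length of the filtered list
theorem countA_eq (rs : List (List (String × String))) (s : String) (c : Int) :
    rs.foldl (fun acc r => if sevOf r == s then acc + 1 else acc) c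
      = c + ((rs.filter (fun r => sevOf r == s)).length : Int) := by
  induction rs generalizing c with
  | nil => simp
  | cons r rs ih =>
    rw [List.foldl_cons, List.filter_cons]
    by_cases h : (sevOf r == s) = true
    · rw [if_pos h, if_pos h, ih]
      simp only [List.length_cons]
      push_cast; ring
    · rw [if_neg h, if_neg h, ih]

-- B's single loop: the high list is the filter, the table holds the counts
theorem stepB_high (st : PySem.Dict String Int × List (List (String × String)))
    (r : List (String × String)) (h : (sevOf r == "high") = true) :
    stepB st r = (st.1.insert (sevOf r) (st.1.getD (sevOf r) 0 + 1), st.2 ++ [r]) := by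
  simp [stepB, h]

theorem stepB_not_high (st : PySem.Dict String Int × List (List (String × String)))
    (r : List (String × String)) (h : ¬ (sevOf r == "high") = true) :
    stepB st r = (st.1.insert (sevOf r) (st.1.getD (sevOf r) 0 + 1), st.2) := by
  simp [stepB, h]

theorem loopB_snd (rs : List (List (String × String)))
    (d : PySem.Dict String Int) (hl : List (List (String × String))) :
    (rs.foldl stepB (d, hl)).2 = hl ++ rs.filter (fun r => sevOf r == "high") := by
  induction rs generalizing d hl with
  | nil => simp
  | cons r rs ih =>
    rw [List.foldl_cons, List.filter_cons]
    by_cases h : (sevOf r == "high") = true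
    · rw [stepB_high _ _ h, if_pos h, ih]; simp
    · rw [stepB_not_high _ _ h, if_neg h, ih]

theorem loopB_cnt (rs : List (List (String × String)))
    (d : PySem.Dict String Int) (hl : List (List (String × String))) (s : String) :
    (rs.foldl stepB (d, hl)).1.getD s 0
      = d.getD s 0 + ((rs.filter (fun r => sevOf r == s)).length : Int) := by
  induction rs generalizing d hl with
  | nil => simp
  | cons r rs ih =>
    rw [List.foldl_cons, List.filter_cons]
    have hins : ∀ (d : PySem.Dict String Int),
        (d.insert (sevOf r) (d.getD (sevOf r) 0 + 1)).getD s 0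
          = d.getD s 0 + (if (sevOf r == s) = true then 1 else 0) := by
      intro d
      rw [PySem.Dict.getD_insert]
      by_cases hs : (sevOf r == s) = true
      · have he : s = sevOf r := (eq_of_beq hs).symm
        rw [if_pos he, if_pos hs, he]
      · have he : ¬ s = sevOf r := fun hc => hs (by rw [hc]; exact beq_self_eq_true _)
        rw [if_neg he, if_neg hs]; ring
    by_cases h : (sevOf r == "high") = true
    · rw [stepB_high _ _ h, ih, hins]
      by_cases hs : (sevOf r == s) = true
      · rw [if_pos hs, if_pos hs]
        simp only [List.length_cons]; push_cast; ring
      · rw [if_neg hs, if_neg hs]; ring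
    · rw [stepB_not_high _ _ h, ih, hins]
      by_cases hs : (sevOf r == s) = true
      · rw [if_pos hs, if_pos hs]
        simp only [List.length_cons]; push_cast; ring
      · rw [if_neg hs, if_neg hs]; ring

-- A's example loop over the first ≤ 2 high issues equals B's "; ".join
theorem examples_eq (hl : List (List (String × String))) (s0 : String) :
    (PySem.List.enumerate (PySem.List.slice hl none (some 2))).foldl
      (fun s p =>
        let s := if p.1 > 0 then s ++ "; " else s
        s ++ exampleOf p.2) s0
    = s0 ++ PySem.Str.join "; " ((PySem.List.slice hl none (some 2)).map exampleOf) := by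
  rw [PySem.List.slice_to hl (by norm_num : (0:Int) ≤ 2)]
  apply String.toList_inj.mp
  match hl with
  | [] =>
    simp [PySem.List.enumerate_nil, PySem.Str.join, PySem.Chars.join_nil]
  | [a] =>
    simp [PySem.List.enumerate_cons, PySem.List.enumerate_nil, PySem.Str.join,
      PySem.Chars.join_singleton]
  | a :: b :: t =>
    simp [List.take_succ_cons, List.take_zero, PySem.List.enumerate_cons,
      PySem.List.enumerate_nil, PySem.Str.join, PySem.Chars.join_cons_cons,
      PySem.Chars.join_singleton]

theorem format_bandit_results_summary_eq (bandit_results : List (String × List (List (String × String)))) :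
    format_bandit_results_summary bandit_results = format_bandit_results_summary_alt bandit_results := by
  unfold format_bandit_results_summary format_bandit_results_summary_alt
  by_cases h0 : bandit_results = []
  · simp [h0]
  · simp only [h0, if_false]
    set results := lookupD bandit_results "results" [] with hres
    by_cases h1 : results = []
    · simp [h1]
    · simp only [h1, if_false]
      have hhl := loopB_snd results PySem.Dict.empty []
      have hHigh : results.foldl (fun acc r => if sevOf r == "high" then acc + 1 else acc) (0 : Int)
          = (results.foldl stepB (PySem.Dict.empty, [])).1.getD "high" 0 := by
        rw [countA_eq, loopB_cnt]; simp
      have hMed : results.foldl (fun acc r => if sevOf r == "medium" then acc + 1 else acc) (0 : Int)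
          = (results.foldl stepB (PySem.Dict.empty, [])).1.getD "medium" 0 := by
        rw [countA_eq, loopB_cnt]; simp
      have hLow : results.foldl (fun acc r => if sevOf r == "low" then acc + 1 else acc) (0 : Int)
          = (results.foldl stepB (PySem.Dict.empty, [])).1.getD "low" 0 := by
        rw [countA_eq, loopB_cnt]; simp
      rw [hHigh, hMed, hLow, hhl]
      rw [List.nil_append]
      by_cases hpos : (results.foldl stepB (PySem.Dict.empty, [])).1.getD "high" 0 > 0
      · have hlen : ((results.filter (fun r => sevOf r == "high")).length : Int) > 0 := by
          have := loopB_cnt results PySem.Dict.empty [] "high"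
          rw [this] at hpos; simpa using hpos
        have hne : results.filter (fun r => sevOf r == "high") ≠ [] := by
          intro hc; rw [hc] at hlen; simp at hlen
        rw [if_pos hpos, if_neg hne, examples_eq]
      · have heq : results.filter (fun r => sevOf r == "high") = [] := by
          have := loopB_cnt results PySem.Dict.empty [] "high"
          rw [this] at hpos
          simp only [PySem.Dict.getD_empty] at hpos
          have h2 : (results.filter (fun r => sevOf r == "high")).length = 0 := by omega
          exact List.length_eq_zero_iff.mp h2
        rw [if_neg hpos, if_pos heq]

-- ===== VERDICT (by name: the statement is the Claim_ definition above) =====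
theorem format_bandit_results_summary_spec : Claim_equal_format_bandit_results_summary := by
  intro bandit_results _
  unfold Spec_format_bandit_results_summary
  exact format_bandit_results_summary_eq bandit_results
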